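-- pv_equiv track=rewrite | github.com/AlexPerazzo/AdventofCode2022 | Advent Of Code 2022/Fresh 11th, 2022.py | monkey0_throw
-- ===== SOURCE A (Python) =====
-- def monkey0_throw(monkey0_count, monkey0_list, monkey6_list, monkey2_list):
--
--     for item in monkey0_list:
--         value = 3 * item
--         while value > 10000000:
--             value = value - 9699690
--
--
--         if value % 13 == 0:
--             monkey6_list.append(value)
--         else:
--             monkey2_list.append(value)
--         monkey0_count += 1
--     monkey0_list.clear()
--
--     return monkey0_count, monkey0_list, monkey6_list, monkey2_list
-- ===== SOURCE B (Python) =====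
-- def monkey0_throw(monkey0_count, monkey0_list, monkey6_list, monkey2_list):
--     # Closed-form ceil-division reduction instead of A's subtraction loop.
--     # Like A, this mutates monkey6_list/monkey2_list and clears monkey0_list.
--     P = 9699690
--     vals = []
--     for item in monkey0_list:
--         v = 3 * item
--         if v > 10000000:
--             v -= P * ((v - 10000000 + P - 1) // P)
--         vals.append(v)
--     monkey6_list.extend(v for v in vals if v % 13 == 0)
--     monkey2_list.extend(v for v in vals if v % 13 != 0)
--     monkey0_count += len(monkey0_list)
--     monkey0_list.clear()
--     return monkey0_count, monkey0_list, monkey6_list, monkey2_list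
-- ===== Notes on version B (the rewrite author's own statement) =====
-- stated objective: alternative
-- what changed: The per-item subtraction loop (repeatedly subtracting 9699690 while the value exceeds 10000000) is replaced by one closed-form ceiling-division formula, and the interleaved append loop by a map followed by two filters.
import Mathlib
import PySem

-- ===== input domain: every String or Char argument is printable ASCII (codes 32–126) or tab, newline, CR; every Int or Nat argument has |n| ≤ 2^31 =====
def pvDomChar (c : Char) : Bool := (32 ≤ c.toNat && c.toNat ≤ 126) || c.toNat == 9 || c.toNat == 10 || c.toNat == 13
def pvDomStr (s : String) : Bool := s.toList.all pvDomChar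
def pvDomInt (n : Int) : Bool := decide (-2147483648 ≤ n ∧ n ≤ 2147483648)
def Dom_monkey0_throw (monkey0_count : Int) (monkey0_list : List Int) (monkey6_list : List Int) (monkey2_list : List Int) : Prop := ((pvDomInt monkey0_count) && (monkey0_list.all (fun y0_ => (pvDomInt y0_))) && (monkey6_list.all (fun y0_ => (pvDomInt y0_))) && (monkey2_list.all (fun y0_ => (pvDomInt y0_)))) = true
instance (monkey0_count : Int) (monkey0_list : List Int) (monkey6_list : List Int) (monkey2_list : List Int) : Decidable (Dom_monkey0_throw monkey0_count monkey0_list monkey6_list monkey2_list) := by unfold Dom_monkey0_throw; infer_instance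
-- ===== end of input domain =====

-- B replaces A's per-item subtraction loop by one closed-form ceiling-division formula and the
-- interleaved appends by a map plus two filters. Python A mutates its list arguments in place;
-- B performs the equivalent mutation; the equivalence proved here is about the return value.

-- ===== PORT A =====
-- while value > 10000000: value -= 9699690
def m0Reduce (v : Int) : Int :=
  if v > 10000000 then m0Reduce (v - 9699690) else v
termination_by v.toNat
decreasing_by omega

-- the 'for item in monkey0_list' loop, threading (count, monkey6_list, monkey2_list)
def m0Loop : List Int → Int → List Int → List Int → Int × List Int × List Int
  | [], c, l6, l2 => (c, l6, l2)
  | item :: rest, c, l6, l2 =>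
    let value := m0Reduce (3 * item)
    if PySem.Int.mod value 13 == 0 then m0Loop rest (c + 1) (l6 ++ [value]) l2
    else m0Loop rest (c + 1) l6 (l2 ++ [value])

def monkey0_throw (monkey0_count : Int) (monkey0_list : List Int) (monkey6_list : List Int) (monkey2_list : List Int) : Int × List Int × List Int × List Int :=
  match m0Loop monkey0_list monkey0_count monkey6_list monkey2_list with
  | (c, l6, l2) => (c, [], l6, l2)  -- monkey0_list.clear()

-- ===== PORT B =====
-- closed-form reduction: one ceiling division instead of the subtraction loop
def m0ReduceAlt (v : Int) : Int :=
  if v > 10000000 then v - 9699690 * (PySem.Int.floordiv (v - 10000000 + 9699689) 9699690) else v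

def monkey0_throw_alt (monkey0_count : Int) (monkey0_list : List Int) (monkey6_list : List Int) (monkey2_list : List Int) : Int × List Int × List Int × List Int :=
  let vals := monkey0_list.map (fun item => m0ReduceAlt (3 * item))
  (monkey0_count + monkey0_list.length,
   [],
   monkey6_list ++ vals.filter (fun v => PySem.Int.mod v 13 == 0),
   monkey2_list ++ vals.filter (fun v => !(PySem.Int.mod v 13 == 0)))

-- ===== PRECONDITION & SPEC =====
def Spec_monkey0_throw (monkey0_count : Int) (monkey0_list : List Int) (monkey6_list : List Int) (monkey2_list : List Int) (out : Int × List Int × List Int × List Int) : Prop := out = monkey0_throw_alt monkey0_count monkey0_list monkey6_list monkey2_list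
instance (monkey0_count : Int) (monkey0_list : List Int) (monkey6_list : List Int) (monkey2_list : List Int) (out : Int × List Int × List Int × List Int) : Decidable (Spec_monkey0_throw monkey0_count monkey0_list monkey6_list monkey2_list out) := by unfold Spec_monkey0_throw; infer_instance

-- ===== CLAIM (what is proved, stated in full; the proofs are below) =====
def Claim_equal_monkey0_throw : Prop := ∀ (monkey0_count : Int) (monkey0_list : List Int) (monkey6_list : List Int) (monkey2_list : List Int), Dom_monkey0_throw monkey0_count monkey0_list monkey6_list monkey2_list → Spec_monkey0_throw monkey0_count monkey0_list monkey6_list monkey2_list (monkey0_throw monkey0_count monkey0_list monkey6_list monkey2_list)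

-- ===== LEMMAS AND PROOFS =====

-- ===== VERDICT (by name: the statement is the Claim_ definition above) =====
theorem reduce_eq (v : Int) : m0Reduce v = m0ReduceAlt v := by
  fun_induction m0Reduce v with
  | case1 v h ih =>
    rw [ih]
    simp only [m0ReduceAlt, PySem.Int.floordiv]
    rw [Int.fdiv_eq_ediv, Int.fdiv_eq_ediv]
    simp only [show ((0:Int) ≤ 9699690 ∨ (9699690:Int) ∣ (v - 10000000 + 9699689)) = True from by simp]
    split_ifs <;> omega
  | case2 v h =>
    simp [m0ReduceAlt, h]

theorem m0Loop_eq (l0 : List Int) (c : Int) (l6 l2 : List Int) :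
    m0Loop l0 c l6 l2 =
      (c + l0.length,
       l6 ++ (l0.map (fun item => m0ReduceAlt (3 * item))).filter (fun v => PySem.Int.mod v 13 == 0),
       l2 ++ (l0.map (fun item => m0ReduceAlt (3 * item))).filter (fun v => !(PySem.Int.mod v 13 == 0))) := by
  induction l0 generalizing c l6 l2 with
  | nil => simp [m0Loop]
  | cons item rest ih =>
    simp only [m0Loop, reduce_eq, ih]
    split <;> simp_all <;> omega

theorem monkey0_throw_spec : Claim_equal_monkey0_throw := by
  intro c l0 l6 l2 _
  unfold Spec_monkey0_throw monkey0_throw monkey0_throw_alt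
  rw [m0Loop_eq]
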